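-- pv_equiv track=rewrite | github.com/madwind/flexget_qbittorrent_mod | wecom.py | _get_msg_limit
-- ===== SOURCE A (Python) =====
-- _TEXT_LIMIT = 1024
--
-- def _get_msg_limit(msg):
--     msg_encode = msg.encode()
--     if len(msg_encode) < _TEXT_LIMIT:
--         return msg, ''
--     msg_lines = msg.split('\n')
--     msg_limit_len = 0
--     for line in msg_lines:
--         line_len = len(line.encode())
--
--         if msg_limit_len == 0 and line_len >= _TEXT_LIMIT:
--             return msg_encode[:_TEXT_LIMIT].decode(), msg_encode[_TEXT_LIMIT:].decode()
--
--         if msg_limit_len + line_len + 1 < _TEXT_LIMIT: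
--             msg_limit_len += line_len + 1
--         else:
--             return msg_encode[:msg_limit_len].decode(), msg_encode[msg_limit_len:].decode()
-- ===== SOURCE B (Python) =====
-- _TEXT_LIMIT = 1024
--
-- def _get_msg_limit(msg):
--     msg_encode = msg.encode()
--     if len(msg_encode) < _TEXT_LIMIT:
--         return msg, ''
--     nl = msg_encode.find(b'\n')
--     first_len = nl if nl != -1 else len(msg_encode)
--     if first_len >= _TEXT_LIMIT:
--         cut = _TEXT_LIMIT
--     else:
--         i = msg_encode.rfind(b'\n', 0, _TEXT_LIMIT - 1)
--         cut = i + 1 if i != -1 else 0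
--     return msg_encode[:cut].decode(), msg_encode[cut:].decode()
-- ===== Notes on version B (the rewrite author's own statement) =====
-- stated objective: idiomatic
-- what changed: Replaces A's split-into-lines-and-accumulate loop with direct byte searches: find the first newline to detect an oversized first line, else rfind the last newline strictly below the 1024-byte limit and cut there.
import Mathlib
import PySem

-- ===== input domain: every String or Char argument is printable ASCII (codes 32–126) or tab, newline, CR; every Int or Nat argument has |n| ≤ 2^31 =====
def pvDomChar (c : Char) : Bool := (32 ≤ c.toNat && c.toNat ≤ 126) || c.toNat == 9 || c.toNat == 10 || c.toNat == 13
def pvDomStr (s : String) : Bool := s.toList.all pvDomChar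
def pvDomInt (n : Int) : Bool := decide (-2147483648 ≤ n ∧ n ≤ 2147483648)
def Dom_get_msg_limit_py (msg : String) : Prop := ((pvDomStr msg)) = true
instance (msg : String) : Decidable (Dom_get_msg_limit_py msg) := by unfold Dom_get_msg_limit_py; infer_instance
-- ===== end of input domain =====

-- B replaces A's split-lines-and-accumulate loop by a direct find/rfind on the encoded bytes (alternative algorithm, same cost); return value only, no mutation.
-- On the ASCII domain msg.encode() is byte-for-byte the character list, so both ports model the byte string as msg.toList (byte length = length, decode = identity).

-- ===== PORT A =====
-- the for-loop over msg_lines with accumulator msg_limit_len; first component of state is the line list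
def pvLoopA (enc : List Char) : List (List Char) → Nat → String × String
  | [], _ => ("", "")  -- Python's implicit `return None` when the loop exhausts; unreachable: the loop is entered only when the total byte budget exceeds the limit, so some line fails the test
  | line :: rest, msg_limit_len =>
    if msg_limit_len = 0 ∧ 1024 ≤ line.length then
      (String.ofList (PySem.List.slice enc none (some 1024)), String.ofList (PySem.List.slice enc (some 1024) none))
    else if msg_limit_len + line.length + 1 < 1024 then
      pvLoopA enc rest (msg_limit_len + line.length + 1)
    else
      (String.ofList (PySem.List.slice enc none (some (msg_limit_len : Int))),
       String.ofList (PySem.List.slice enc (some (msg_limit_len : Int)) none))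

def get_msg_limit_py (msg : String) : String × String :=
  let msg_encode := msg.toList          -- msg.encode(): exact on the ASCII Dom
  if msg_encode.length < 1024 then (msg, "")
  else pvLoopA msg_encode (PySem.Chars.splitOn msg.toList ['\n']) 0   -- msg.split('\n')

-- ===== PORT B =====
def get_msg_limit_py_alt (msg : String) : String × String :=
  let msg_encode := msg.toList          -- msg.encode(): exact on the ASCII Dom
  if msg_encode.length < 1024 then (msg, "")
  else
    -- nl = msg_encode.find(b'\n'): first index, none ↔ -1
    let first_len := (msg_encode.idxOf? '\n').getD msg_encode.length
    let cut : Nat :=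
      if 1024 ≤ first_len then 1024
      else
        -- i = msg_encode.rfind(b'\n', 0, 1023): last index of the byte among the first 1023 bytes (rfind = find in the reversed prefix)
        let pre := msg_encode.take 1023
        match pre.reverse.idxOf? '\n' with
        | some j => (pre.length - 1 - j) + 1
        | none => 0
    (String.ofList (PySem.List.slice msg_encode none (some (cut : Int))),
     String.ofList (PySem.List.slice msg_encode (some (cut : Int)) none))

-- ===== PRECONDITION & SPEC =====
def Spec_get_msg_limit_py (msg : String) (out : String × String) : Prop := out = get_msg_limit_py_alt msg
instance (msg : String) (out : String × String) : Decidable (Spec_get_msg_limit_py msg out) := by unfold Spec_get_msg_limit_py; infer_instance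

-- ===== CLAIM (what is proved, stated in full; the proofs are below) =====
def Claim_equal_get_msg_limit_py : Prop := ∀ (msg : String), Dom_get_msg_limit_py msg → Spec_get_msg_limit_py msg (get_msg_limit_py msg)

-- ===== LEMMAS AND PROOFS =====

-- the tuple both ports return once the cut point is fixed
def pvPair (enc : List Char) (c : Nat) : String × String :=
  (String.ofList (PySem.List.slice enc none (some (c : Int))),
   String.ofList (PySem.List.slice enc (some (c : Int)) none))

lemma pvPair_congr (enc : List Char) {c d : Nat} (h : c = d) : pvPair enc c = pvPair enc d := by
  rw [h]

-- proof-side model of str.split('\n') (PySem.Chars.splitOn.go without fuel)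
def pvSplitAux : List Char → List Char → List (List Char)
  | [], cur => [cur.reverse]
  | c :: rest, cur => if c = '\n' then cur.reverse :: pvSplitAux rest [] else pvSplitAux rest (c :: cur)

-- index of the last '\n' in a list, if any
def pvLastNl : List Char → Option Nat
  | [] => none
  | c :: rest =>
    match pvLastNl rest with
    | some j => some (j + 1)
    | none => if c = '\n' then some 0 else none

-- the cut point contributed by the suffix: one past the last newline among its first m bytes
def pvCut (l : List Char) (m : Nat) : Nat :=
  match pvLastNl (l.take m) with
  | some j => j + 1
  | none => 0

lemma pvCut_some {l : List Char} {m j : Nat} (h : pvLastNl (l.take m) = some j) :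
    pvCut l m = j + 1 := by
  unfold pvCut; rw [h]

lemma pvCut_none {l : List Char} {m : Nat} (h : pvLastNl (l.take m) = none) :
    pvCut l m = 0 := by
  unfold pvCut; rw [h]

lemma pvGo_eq : ∀ (fuel : Nat) (l cur : List Char) (acc : List (List Char)), l.length < fuel →
    PySem.Chars.splitOn.go ['\n'] fuel l cur acc = acc.reverse ++ pvSplitAux l cur := by
  intro fuel
  induction fuel with
  | zero => intro l cur acc h; omega
  | succ n ih =>
    intro l cur acc h
    cases l with
    | nil => simp [PySem.Chars.splitOn.go, pvSplitAux]
    | cons c rest =>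
      simp only [PySem.Chars.splitOn.go, List.isPrefixOf, Bool.and_true, List.length_cons] at *
      by_cases hc : '\n' = c
      · subst hc
        simp only [BEq.rfl, if_pos, List.drop_succ_cons, List.length_nil, List.drop_zero]
        rw [ih rest [] (cur.reverse :: acc) (by omega)]
        simp [pvSplitAux]
      · have : ('\n' == c) = false := by simp [hc]
        simp only [this, Bool.false_eq_true, if_false]
        rw [ih rest (c :: cur) acc (by omega)]
        have : ¬ (c = '\n') := fun e => hc e.symm
        simp [pvSplitAux, this]

lemma pvSplitOn_eq (l : List Char) : PySem.Chars.splitOn l ['\n'] = pvSplitAux l [] := by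
  rw [PySem.Chars.splitOn, pvGo_eq (l.length + 1) l [] [] (by omega)]
  rfl

lemma pvSplitAux_no_nl {l : List Char} (h : '\n' ∉ l) (cur : List Char) :
    pvSplitAux l cur = [cur.reverse ++ l] := by
  induction l generalizing cur with
  | nil => simp [pvSplitAux]
  | cons c rest ih =>
    simp only [List.mem_cons, not_or] at h
    simp [pvSplitAux, Ne.symm h.1, ih h.2]

lemma pvSplitAux_append {t : List Char} (h : '\n' ∉ t) (r cur : List Char) :
    pvSplitAux (t ++ '\n' :: r) cur = (cur.reverse ++ t) :: pvSplitAux r [] := by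
  induction t generalizing cur with
  | nil => simp [pvSplitAux]
  | cons c rest ih =>
    simp only [List.mem_cons, not_or] at h
    simp [pvSplitAux, Ne.symm h.1, ih h.2]

lemma pvLastNl_none {l : List Char} (h : '\n' ∉ l) : pvLastNl l = none := by
  induction l with
  | nil => rfl
  | cons c rest ih =>
    simp only [List.mem_cons, not_or] at h
    simp [pvLastNl, ih h.2, Ne.symm h.1]

lemma pvLastNl_lt {l : List Char} {i : Nat} (h : pvLastNl l = some i) : i < l.length := by
  induction l generalizing i with
  | nil => simp [pvLastNl] at h
  | cons c rest ih =>
    simp only [pvLastNl] at h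
    cases hr : pvLastNl rest with
    | some j => rw [hr] at h; simp at h; subst h; simpa using ih hr
    | none =>
      rw [hr] at h
      by_cases hc : c = '\n' <;> simp [hc] at h
      simp [h.symm]

lemma pvLastNl_append {t : List Char} (h : '\n' ∉ t) (r : List Char) :
    pvLastNl (t ++ '\n' :: r) =
      some (match pvLastNl r with | some j => t.length + 1 + j | none => t.length) := by
  induction t with
  | nil =>
    simp only [List.nil_append, pvLastNl]
    cases pvLastNl r
    · simp
    · simp; ring
  | cons c rest ih =>
    simp only [List.mem_cons, not_or] at h
    simp only [List.cons_append, pvLastNl, ih h.2]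
    cases pvLastNl r
    · simp
    · simp; ring

lemma pvIdxOf_app (l1 l2 : List Char) (a : Char) :
    (l1 ++ l2).idxOf? a = (l1.idxOf? a).orElse (fun _ => (l2.idxOf? a).map (· + l1.length)) := by
  induction l1 with
  | nil => simp
  | cons c rest ih =>
    by_cases hc : c == a
    · simp [List.idxOf?_cons, hc]
    · simp only [List.cons_append, List.idxOf?_cons, hc, Bool.false_eq_true, if_false, ih]
      cases rest.idxOf? a <;> cases l2.idxOf? a <;> (simp [Option.orElse]; try ring)

lemma pvIdxOf_none {l : List Char} (h : '\n' ∉ l) : l.idxOf? '\n' = none := by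
  induction l with
  | nil => rfl
  | cons c rest ih =>
    simp only [List.mem_cons, not_or] at h
    simp [List.idxOf?_cons, Ne.symm h.1, ih h.2]


lemma pvIdxOf_append {t : List Char} (h : '\n' ∉ t) (r : List Char) :
    (t ++ '\n' :: r).idxOf? '\n' = some t.length := by
  rw [pvIdxOf_app, pvIdxOf_none h]
  simp [List.idxOf?_cons]

-- rfind = find in the reversed list
lemma pvIdxOf_reverse (l : List Char) :
    l.reverse.idxOf? '\n' = (pvLastNl l).map (fun i => l.length - 1 - i) := by
  induction l with
  | nil => rfl
  | cons c rest ih =>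
    rw [List.reverse_cons, pvIdxOf_app, ih]
    simp only [pvLastNl]
    cases hr : pvLastNl rest with
    | some j =>
      have hj := pvLastNl_lt hr
      simp only [Option.map_some, Option.orElse_some]
      simp
      omega
    | none =>
      simp only [Option.map_none, Option.orElse_none, List.idxOf?_cons]
      by_cases hc : c = '\n'
      · simp [hc]
      · simp [hc]

-- every list is newline-free or splits at its first newline
lemma pvDecomp (l : List Char) :
    '\n' ∉ l ∨ ∃ t r, l = t ++ '\n' :: r ∧ '\n' ∉ t := by
  induction l with
  | nil => exact Or.inl (by simp)
  | cons c rest ih =>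
    by_cases hc : c = '\n'
    · exact Or.inr ⟨[], rest, by simp [hc], by simp⟩
    · rcases ih with h | ⟨t, r, rfl, ht⟩
      · exact Or.inl (by simp [Ne.symm hc, h])
      · exact Or.inr ⟨c :: t, r, by simp, by simp [Ne.symm hc, ht]⟩

-- prefix-of-append computation used to push `take` past the first line
lemma pvTake_append {t : List Char} (r : List Char) {m : Nat} (h : t.length < m) :
    (t ++ '\n' :: r).take m = t ++ '\n' :: r.take (m - t.length - 1) := by
  rw [List.take_append, List.take_of_length_le (by omega)]
  congr 1
  rw [List.take_cons (by omega)]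

lemma pvTake_append_le {t : List Char} (r : List Char) {m : Nat} (h : m ≤ t.length) :
    (t ++ '\n' :: r).take m = t.take m := by
  rw [List.take_append]
  simp [Nat.sub_eq_zero_of_le h]

-- the core invariant: past the first line the loop returns the last newline boundary below the limit
lemma pvLoopA_eq (enc : List Char) :
    ∀ (N : Nat) (l : List Char) (acc : Nat), l.length ≤ N → 1 ≤ acc → acc ≤ 1023 →
      1024 ≤ acc + l.length →
      pvLoopA enc (pvSplitAux l []) acc = pvPair enc (acc + pvCut l (1023 - acc)) := by
  intro N
  induction N with
  | zero => intro l acc h0 h1 h2 h3; omega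
  | succ n ih =>
    intro l acc h0 h1 h2 h3
    rcases pvDecomp l with hno | ⟨t, r, rfl, ht⟩
    · rw [pvSplitAux_no_nl hno, pvLoopA]
      rw [if_neg (fun hx => by omega), if_neg (by simp; omega),
        pvCut_none (pvLastNl_none (fun hm => hno (List.mem_of_mem_take hm)))]
      simp [pvPair]
    · have hlen : t.length + 1 + r.length = (t ++ '\n' :: r).length := by simp; ring
      rw [pvSplitAux_append ht, List.reverse_nil, List.nil_append, pvLoopA,
        if_neg (fun hx => by omega)]
      by_cases hk : acc + t.length + 1 < 1024
      · rw [if_pos hk, ih r (acc + t.length + 1) (by simp at h0; omega) (by omega) (by omega)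
          (by simp at h3; omega)]
        have hm : 1023 - acc - t.length - 1 = 1023 - (acc + t.length + 1) := by omega
        have htk : (t ++ '\n' :: r).take (1023 - acc)
            = t ++ '\n' :: r.take (1023 - (acc + t.length + 1)) := by
          rw [pvTake_append r (show t.length < 1023 - acc by omega), hm]
        cases hr : pvLastNl (r.take (1023 - (acc + t.length + 1))) with
        | some j =>
          rw [pvCut_some (l := t ++ '\n' :: r) (j := t.length + 1 + j)
              (by rw [htk, pvLastNl_append ht, hr]),
            pvCut_some hr]
          refine pvPair_congr _ ?_
          omega
        | none =>
          rw [pvCut_some (l := t ++ '\n' :: r) (j := t.length)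
              (by rw [htk, pvLastNl_append ht, hr]),
            pvCut_none hr]
          refine pvPair_congr _ ?_
          omega
      · rw [if_neg hk]
        unfold pvCut
        rw [pvTake_append_le r (by omega : 1023 - acc ≤ t.length),
          pvLastNl_none (fun hm => ht (List.mem_of_mem_take hm))]
        simp [pvPair]

-- ===== VERDICT (by name: the statement is the Claim_ definition above) =====
lemma pvArith0 (a : Nat) : 1023 - a - 1 = 1023 - (0 + a + 1) := by omega

lemma pvArith1 (a b : Nat) (h1 : 0 + a + 1 < 1024) (h2 : b < 1023 - (0 + a + 1)) :
    0 + a + 1 + (b + 1) = 1023 - 1 - (1023 - 1 - (a + 1 + b)) + 1 := by omega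

lemma pvArith2 (a : Nat) (h1 : 0 + a + 1 < 1024) :
    0 + a + 1 + 0 = 1023 - 1 - (1023 - 1 - a) + 1 := by omega

theorem get_msg_limit_py_spec : Claim_equal_get_msg_limit_py := by
  intro msg _
  unfold Spec_get_msg_limit_py get_msg_limit_py get_msg_limit_py_alt
  simp only []
  by_cases hn : msg.toList.length < 1024
  · rw [if_pos hn, if_pos hn]
  · rw [if_neg hn, if_neg hn, pvSplitOn_eq]
    rcases pvDecomp msg.toList with hno | ⟨t, r, henc, ht⟩
    · rw [pvSplitAux_no_nl hno, List.reverse_nil, List.nil_append, pvLoopA,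
        if_pos ⟨rfl, by omega⟩, pvIdxOf_none hno, Option.getD_none,
        if_pos (by omega : 1024 ≤ msg.toList.length)]
      norm_num
    · have hlen : msg.toList.length = t.length + 1 + r.length := by rw [henc]; simp; ring
      have hsplit : pvSplitAux msg.toList [] = t :: pvSplitAux r [] := by
        rw [henc, pvSplitAux_append ht]; simp
      have hidx : msg.toList.idxOf? '\n' = some t.length := by rw [henc]; exact pvIdxOf_append ht r
      rw [hsplit, pvLoopA, hidx, Option.getD_some]
      by_cases h1024 : 1024 ≤ t.length
      · rw [if_pos ⟨rfl, h1024⟩, if_pos h1024]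
        norm_num
      · rw [if_neg (fun hx => h1024 hx.2), if_neg h1024]
        by_cases hk : 0 + t.length + 1 < 1024
        · rw [if_pos hk, pvLoopA_eq msg.toList r.length r (0 + t.length + 1) le_rfl (by omega)
            (by omega) (by omega)]
          have htake : msg.toList.take 1023 = t ++ '\n' :: r.take (1023 - (0 + t.length + 1)) := by
            rw [henc, pvTake_append r (by omega : t.length < 1023), pvArith0 t.length]
          have hfull : (t ++ '\n' :: r.take (1023 - (0 + t.length + 1))).length = 1023 := by
            have h1 : (r.take (1023 - (0 + t.length + 1))).length = 1023 - (0 + t.length + 1) := by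
              rw [List.length_take]; omega
            simp only [List.length_append, List.length_cons, h1]
            omega
          rw [htake, pvIdxOf_reverse, hfull]
          cases hr2 : pvLastNl (r.take (1023 - (0 + t.length + 1))) with
          | some j =>
            have hj : j < 1023 - (0 + t.length + 1) := by
              have h1 := pvLastNl_lt hr2
              have h2 := List.length_take_le (1023 - (0 + t.length + 1)) r
              omega
            rw [pvCut_some hr2, pvLastNl_append ht, hr2]
            simp only [Option.map_some]
            show pvPair msg.toList _ = pvPair msg.toList _
            exact pvPair_congr _ (pvArith1 t.length j hk hj)
          | none =>
            rw [pvCut_none hr2, pvLastNl_append ht, hr2]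
            simp only [Option.map_some]
            show pvPair msg.toList _ = pvPair msg.toList _
            exact pvPair_congr _ (pvArith2 t.length hk)
        · rw [if_neg hk]
          have htake : msg.toList.take 1023 = t.take 1023 := by
            rw [henc]; exact pvTake_append_le r (by omega)
          rw [htake, pvIdxOf_reverse,
            pvLastNl_none (fun hm => ht (List.mem_of_mem_take hm))]
          simp only [Option.map_none]
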